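-- pv_equiv track=rewrite | github.com/TrainToGPB/baekjoon | sol_1913.py | make_snail_board
-- ===== SOURCE A (Python) =====
-- def move_and_write(number: int, board: list, coor_now: list, direction: list):
--     coor_new = [coor_now[0] + direction[0], coor_now[1] + direction[1]]
--     board[coor_new[1]][coor_new[0]] = number
--     return coor_new, board
--
-- def make_snail_board(n, target):
--     board = [[0] * n for _ in range(n)]
--     coor_original = [n//2, n//2]
--     coor = coor_original[:]
--     number = 1
--     board[coor[1]][coor[0]] = number
--
--     directions = [[0, -1], [1, 0], [0, 1], [-1, 0]] # 상, 우, 하, 좌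
--     snail_idx = 1
--     if n == 1:
--         return board, [1, 1]
--
--     while True:
--         for direction in directions:
--             for _ in range((snail_idx + 1)//2):
--                 number += 1
--                 coor, board = move_and_write(number, board, coor, direction)
--                 if target == 1:
--                     coor_target = coor_original[:]
--                 elif number == target:
--                     coor_target = coor
--                 if number == n**2:
--                     return board, [ct + 1 for ct in coor_target[::-1]]
--             snail_idx += 1
-- ===== SOURCE B (Python) =====
-- DIRS = [(0, -1), (1, 0), (0, 1), (-1, 0)]  # up, right, down, left
--
-- def make_snail_board(n, target):
--     if n == 1:
--         return [[1]], [1, 1]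
--     # over-generate whole segments (lengths 1,1,2,2,3,3,...), then truncate
--     need = n * n - 1
--     moves = []
--     j = 1
--     while len(moves) < need:
--         moves.extend([DIRS[(j - 1) % 4]] * ((j + 1) // 2))
--         j += 1
--     moves = moves[:need]
--     # coordinate sequence: coords[k] is where number k+1 lives
--     c = n // 2
--     coords = [(c, c)]
--     for dx, dy in moves:
--         x, y = coords[-1]
--         coords.append((x + dx, y + dy))
--     # separate fill pass
--     board = [[0] * n for _ in range(n)]
--     for k, (x, y) in enumerate(coords):
--         board[y][x] = k + 1
--     # direct index for the target (coords[0] is the center, so target == 1 needs no special case)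
--     tx, ty = coords[target - 1]
--     return board, [ty + 1, tx + 1]
-- ===== Notes on version B (the rewrite author's own statement) =====
-- stated objective: alternative
-- what changed: B replaces A's single fused walk (which mutates the board, tracks the target coordinate with per-step comparisons, and early-returns mid-loop) by three separate passes: over-generate whole spiral segments and truncate to the coordinate sequence, fill the board over enumerate(coords), and resolve the target by direct indexing coords[target-1] with no comparison or special case for target==1.
import Mathlib
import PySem

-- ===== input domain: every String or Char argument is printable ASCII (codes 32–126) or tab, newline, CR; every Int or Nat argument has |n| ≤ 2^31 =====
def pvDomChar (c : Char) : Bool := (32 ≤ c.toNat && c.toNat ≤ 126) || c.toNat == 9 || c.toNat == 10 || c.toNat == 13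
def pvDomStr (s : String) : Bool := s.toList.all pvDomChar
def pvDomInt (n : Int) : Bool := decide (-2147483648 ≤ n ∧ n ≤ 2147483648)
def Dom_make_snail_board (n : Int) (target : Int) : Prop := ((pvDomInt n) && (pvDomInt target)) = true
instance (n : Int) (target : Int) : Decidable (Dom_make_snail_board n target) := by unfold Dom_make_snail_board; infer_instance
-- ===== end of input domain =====

-- B rebuilds the spiral in three separate passes (segment list → coordinate sequence → fill board, then direct
-- indexing coords[target-1]) instead of A's single fused walk with per-step target comparisons and a mid-loop return;
-- objective: alternative decomposition, same O(n^2) cost.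

-- Shared low-level primitive: the Python statement `board[y][x] = v` (IndexError = none), used by both ports.
def pyWriteCell (b : List (List Int)) (x y v : Int) : Option (List (List Int)) :=
  match PySem.List.pyGet? b y with
  | none => none
  | some row =>
    match PySem.List.pySet? row x v with
    | none => none
    | some row' => PySem.List.pySet? b y row'

-- `board[y][x] = v` on an already-possibly-failed board (a raise propagates).
def pyWrite (o : Option (List (List Int))) (x y v : Int) : Option (List (List Int)) :=
  match o with
  | none => none
  | some b => pyWriteCell b x y v

-- ===== PORT A =====
-- Python helper move_and_write (board threaded as Option: a failed write = the Python IndexError).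
def move_and_write (number : Int) (board : Option (List (List Int))) (coor_now : Int × Int)
    (direction : Int × Int) : (Int × Int) × Option (List (List Int)) :=
  let coor_new := (coor_now.1 + direction.1, coor_now.2 + direction.2)
  (coor_new, pyWrite board coor_new.1 coor_new.2 number)

-- inner `for _ in range((snail_idx+1)//2)` loop; .error r = the function returned (r = none means Python raised:
-- unbound coor_target or a failed write).
def pvInnerA (n target : Int) (cnt : Nat) (d : Int × Int) (number : Int) (coor : Int × Int)
    (board : Option (List (List Int))) (ctg : Option (Int × Int)) (co : Int × Int) :
    Except (Option (List (List Int) × List Int))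
      (Int × (Int × Int) × Option (List (List Int)) × Option (Int × Int)) :=
  match cnt with
  | 0 => .ok (number, coor, board, ctg)
  | cnt + 1 =>
    let number' := number + 1
    let cb := move_and_write number' board coor d
    let coor' := cb.1
    let board' := cb.2
    let ctg' := if target = 1 then some co else if number' = target then some coor' else ctg
    if number' = n ^ 2 then
      .error (match board', ctg' with
              | some b, some ct => some (b, [ct.2 + 1, ct.1 + 1])
              | _, _ => none)
    else
      pvInnerA n target cnt d number' coor' board' ctg' co

-- `for direction in directions` loop (snail_idx incremented after each direction).
def pvDirsA (n target : Int) (ds : List (Int × Int)) (si number : Int) (coor : Int × Int)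
    (board : Option (List (List Int))) (ctg : Option (Int × Int)) (co : Int × Int) :
    Except (Option (List (List Int) × List Int))
      (Int × Int × (Int × Int) × Option (List (List Int)) × Option (Int × Int)) :=
  match ds with
  | [] => .ok (si, number, coor, board, ctg)
  | d :: rest =>
    match pvInnerA n target (PySem.Int.floordiv (si + 1) 2).toNat d number coor board ctg co with
    | .error r => .error r
    | .ok (number', coor', board', ctg') => pvDirsA n target rest (si + 1) number' coor' board' ctg' co

-- `while True` loop; the fuel only makes the recursion structural (on every input A returns on, it suffices).
def pvWhileA (fuel : Nat) (n target si number : Int) (coor : Int × Int)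
    (board : Option (List (List Int))) (ctg : Option (Int × Int)) (co : Int × Int) :
    Option (List (List Int) × List Int) :=
  match fuel with
  | 0 => none
  | fuel + 1 =>
    match pvDirsA n target [(0, -1), (1, 0), (0, 1), (-1, 0)] si number coor board ctg co with
    | .error r => r
    | .ok (si', number', coor', board', ctg') => pvWhileA fuel n target si' number' coor' board' ctg' co

def make_snail_board (n : Int) (target : Int) : List (List Int) × List Int :=
  let board0 : Option (List (List Int)) := some (List.replicate n.toNat (List.replicate n.toNat 0))
  let c := PySem.Int.floordiv n 2
  let board1 := pyWrite board0 c c 1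
  if n = 1 then
    match board1 with
    | some b => (b, [1, 1])
    | none => ([], [])
  else
    match pvWhileA (n ^ 2).toNat n target 1 1 (c, c) board1 none (c, c) with
    | some r => r
    | none => ([], [])

-- ===== PORT B =====
def snailDIRS : List (Int × Int) := [(0, -1), (1, 0), (0, 1), (-1, 0)]

-- `while len(moves) < need: moves.extend([DIRS[(j-1)%4]] * ((j+1)//2)); j += 1` (fuel makes it structural).
def pvSegsB (fuel : Nat) (moves : List (Int × Int)) (j need : Int) : List (Int × Int) :=
  match fuel with
  | 0 => moves
  | fuel + 1 =>
    if (moves.length : Int) < need then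
      pvSegsB fuel
        (moves ++ List.replicate (PySem.Int.floordiv (j + 1) 2).toNat
          (PySem.List.pyGetD snailDIRS (PySem.Int.mod (j - 1) 4) (0, 0)))
        (j + 1) need
    else moves

-- coords: prefix positions of the move list, starting at the center.
def buildCoords (c : Int × Int) : List (Int × Int) → List (Int × Int)
  | [] => [c]
  | m :: ms => c :: buildCoords (c.1 + m.1, c.2 + m.2) ms

-- `for k, (x, y) in enumerate(coords): board[y][x] = k + 1`
def pvFillB (board : Option (List (List Int))) : List (Int × (Int × Int)) → Option (List (List Int))
  | [] => board
  | (k, xy) :: rest => pvFillB (pyWrite board xy.1 xy.2 (k + 1)) rest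

def make_snail_board_alt (n : Int) (target : Int) : List (List Int) × List Int :=
  if n = 1 then ([[1]], [1, 1])
  else
    let need := n * n - 1
    let moves0 := pvSegsB (n * n - 1).toNat [] 1 need
    let moves := PySem.List.slice moves0 none (some need)
    let c := PySem.Int.floordiv n 2
    let coords := buildCoords (c, c) moves
    let board := pvFillB (some (List.replicate n.toNat (List.replicate n.toNat 0))) (PySem.List.enumerate coords)
    match board, PySem.List.pyGet? coords (target - 1) with
    | some b, some t => (b, [t.2 + 1, t.1 + 1])
    | _, _ => ([], [])

-- ===== PRECONDITION & SPEC =====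
-- Pre_ excludes exactly the inputs on which the Python A raises: n ≤ 0 or even n (the walk indexes off the board:
-- IndexError), and for n ≥ 3 a target outside 1..n^2 (coor_target stays unbound: UnboundLocalError at the return).
def Pre_make_snail_board (n : Int) (target : Int) : Prop :=
  n = 1 ∨ (3 ≤ n ∧ PySem.Int.mod n 2 = 1 ∧ 1 ≤ target ∧ target ≤ n * n)
instance (n : Int) (target : Int) : Decidable (Pre_make_snail_board n target) := by
  unfold Pre_make_snail_board; infer_instance

def pvWitness_make_snail_board : Int × Int := (3, 5)

def Spec_make_snail_board (n : Int) (target : Int) (out : List (List Int) × List Int) : Prop :=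
  out = make_snail_board_alt n target
instance (n : Int) (target : Int) (out : List (List Int) × List Int) :
    Decidable (Spec_make_snail_board n target out) := by unfold Spec_make_snail_board; infer_instance

-- ===== CLAIM (what is proved, stated in full; the proofs are below) =====
def Claim_equal_make_snail_board : Prop := ∀ (n : Int) (target : Int), Dom_make_snail_board n target →
  Pre_make_snail_board n target → Spec_make_snail_board n target (make_snail_board n target)


-- ===== LEMMAS AND PROOFS =====

-- Proof-layer descriptions of the spiral walk (used only by the proofs below).
def pvStep (p m : Int × Int) : Int × Int := (p.1 + m.1, p.2 + m.2)

-- position after t moves of M, starting at c0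
def pvPos (c0 : Int × Int) (M : List (Int × Int)) (t : Nat) : Int × Int := (M.take t).foldl pvStep c0

-- write v, v+1, ... at the successive coordinates
def pvWriteRun : Option (List (List Int)) → List (Int × Int) → Int → Option (List (List Int))
  | o, [], _ => o
  | o, c :: cs, k => pvWriteRun (pyWrite o c.1 c.2 k) cs (k + 1)

def pvZeros (n : Int) : List (List Int) := List.replicate n.toNat (List.replicate n.toNat 0)

def pvBoardAt (n : Int) (c0 : Int × Int) (M : List (Int × Int)) (t : Nat) : Option (List (List Int)) :=
  pvWriteRun (some (pvZeros n)) ((buildCoords c0 M).take (t + 1)) 1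

def pvCtgAt (target : Int) (c0 : Int × Int) (M : List (Int × Int)) (t : Nat) : Option (Int × Int) :=
  if target = 1 ∧ 1 ≤ t then some c0
  else if 2 ≤ target ∧ target ≤ (t : Int) + 1 then some (pvPos c0 M (target - 1).toNat)
  else none

def pvF (n target : Int) (c0 : Int × Int) (M : List (Int × Int)) : Option (List (List Int) × List Int) :=
  match pvBoardAt n c0 M ((n ^ 2).toNat - 1), pvCtgAt target c0 M ((n ^ 2).toNat - 1) with
  | some b, some ct => some (b, [ct.2 + 1, ct.1 + 1])
  | _, _ => none

def pvSegLen (j : Nat) : Nat := (j + 1) / 2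
def pvDirAt (j : Nat) : Int × Int := snailDIRS.getD ((j - 1) % 4) (0, 0)
def pvFullTo : Nat → List (Int × Int)
  | 0 => []
  | j + 1 => pvFullTo j ++ List.replicate (pvSegLen (j + 1)) (pvDirAt (j + 1))

lemma pvLength_buildCoords (ms : List (Int × Int)) : ∀ c, (buildCoords c ms).length = ms.length + 1 := by
  induction ms with
  | nil => intro c; rfl
  | cons m ms ih => intro c; simp [buildCoords, ih]

lemma pvGetElem?_buildCoords (ms : List (Int × Int)) : ∀ (c : Int × Int) (t : Nat), t ≤ ms.length →
    (buildCoords c ms)[t]? = some (pvPos c ms t) := by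
  induction ms with
  | nil =>
    intro c t ht
    have h0 : t = 0 := by simpa using ht
    subst h0; rfl
  | cons m ms ih =>
    intro c t ht
    cases t with
    | zero => rfl
    | succ t =>
      simp only [buildCoords, List.getElem?_cons_succ]
      rw [ih _ t (by simpa using ht)]
      simp [pvPos, pvStep]

lemma pvTake_buildCoords_succ (ms : List (Int × Int)) (c : Int × Int) (t : Nat) (ht : t ≤ ms.length) :
    (buildCoords c ms).take (t + 1) = (buildCoords c ms).take t ++ [pvPos c ms t] := by
  rw [List.take_add_one, pvGetElem?_buildCoords ms c t ht]
  rfl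

lemma pvWriteRun_append (cs : List (Int × Int)) : ∀ (o : Option (List (List Int))) (c : Int × Int) (k : Int),
    pvWriteRun o (cs ++ [c]) k = pyWrite (pvWriteRun o cs k) c.1 c.2 (k + cs.length) := by
  induction cs with
  | nil => intro o c k; simp [pvWriteRun]
  | cons x cs ih => intro o c k; simp [pvWriteRun, ih]; ring_nf

lemma pvPos_succ (c0 : Int × Int) (M : List (Int × Int)) (t : Nat) (ht : t < M.length) :
    pvPos c0 M (t + 1) = pvStep (pvPos c0 M t) M[t] := by
  have h1 : M.take (t + 1) = M.take t ++ [M[t]] := by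
    rw [List.take_add_one, List.getElem?_eq_getElem ht]; rfl
  unfold pvPos
  rw [h1, List.foldl_append]
  rfl

lemma pvBoardAt_succ (n : Int) (c0 : Int × Int) (M : List (Int × Int)) (t : Nat) (ht : t < M.length) :
    pvBoardAt n c0 M (t + 1)
      = pyWrite (pvBoardAt n c0 M t) (pvPos c0 M (t + 1)).1 (pvPos c0 M (t + 1)).2 ((t : Int) + 2) := by
  unfold pvBoardAt
  rw [pvTake_buildCoords_succ M c0 (t + 1) (by omega), pvWriteRun_append]
  congr 1
  rw [List.length_take]
  have : (buildCoords c0 M).length = M.length + 1 := pvLength_buildCoords M c0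
  have h2 : min (t + 1) (buildCoords c0 M).length = t + 1 := by omega
  rw [h2]
  push_cast
  ring

lemma pvCtgAt_succ (target : Int) (c0 : Int × Int) (M : List (Int × Int)) (t : Nat) :
    pvCtgAt target c0 M (t + 1)
      = if target = 1 then some c0
        else if (t : Int) + 2 = target then some (pvPos c0 M (t + 1))
        else pvCtgAt target c0 M t := by
  unfold pvCtgAt
  by_cases h1 : target = 1
  · rw [if_pos (⟨h1, by omega⟩ : target = 1 ∧ 1 ≤ t + 1), if_pos h1]
  · rw [if_neg (show ¬(target = 1 ∧ 1 ≤ t + 1) from fun h => h1 h.1), if_neg h1,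
      if_neg (show ¬(target = 1 ∧ 1 ≤ t) from fun h => h1 h.1)]
    by_cases h2 : (t : Int) + 2 = target
    · rw [if_pos h2, if_pos (show 2 ≤ target ∧ target ≤ ((t + 1 : Nat) : Int) + 1 by
        push_cast; omega)]
      have he : (target - 1).toNat = t + 1 := by omega
      rw [he]
    · rw [if_neg h2]
      by_cases h3 : 2 ≤ target ∧ target ≤ (t : Int) + 1
      · rw [if_pos h3, if_pos (show 2 ≤ target ∧ target ≤ ((t + 1 : Nat) : Int) + 1 by
          obtain ⟨a, b⟩ := h3; push_cast; omega)]
      · rw [if_neg h3, if_neg (show ¬(2 ≤ target ∧ target ≤ ((t + 1 : Nat) : Int) + 1) by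
          push_cast; omega)]

lemma pvFillB_enumerate (cs : List (Int × Int)) : ∀ (o : Option (List (List Int))) (s : Int),
    pvFillB o (PySem.List.enumerate cs s) = pvWriteRun o cs (s + 1) := by
  induction cs with
  | nil => intro o s; simp [PySem.List.enumerate_nil, pvFillB, pvWriteRun]
  | cons c cs ih => intro o s; rw [PySem.List.enumerate_cons]; simp [pvFillB, pvWriteRun, ih]

lemma pvOne_le_segLen (j : Nat) : 1 ≤ pvSegLen (j + 1) := by unfold pvSegLen; omega

lemma pvLength_fullTo_succ (j : Nat) : (pvFullTo (j + 1)).length = (pvFullTo j).length + pvSegLen (j + 1) := by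
  simp [pvFullTo]

lemma pvFullTo_mono (j J : Nat) (h : j ≤ J) : (pvFullTo j).length ≤ (pvFullTo J).length := by
  induction J with
  | zero => interval_cases j; simp
  | succ J ih =>
    rcases Nat.lt_or_ge j (J + 1) with h' | h'
    · have := ih (by omega)
      rw [pvLength_fullTo_succ]; omega
    · have : j = J + 1 := by omega
      subst this; rfl

lemma pvFullTo_prefix (j J : Nat) (h : j ≤ J) : ∃ rest, pvFullTo J = pvFullTo j ++ rest := by
  induction J with
  | zero => exact ⟨[], by interval_cases j; simp⟩
  | succ J ih =>
    rcases Nat.lt_or_ge j (J + 1) with h' | h'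
    · obtain ⟨rest, hr⟩ := ih (by omega)
      exact ⟨rest ++ List.replicate (pvSegLen (J + 1)) (pvDirAt (J + 1)), by
        simp [pvFullTo, hr]⟩
    · have : j = J + 1 := by omega
      subst this; exact ⟨[], by simp⟩

lemma pvFullTo_getElem? (j i J : Nat) (hi : i < pvSegLen (j + 1)) (hJ : j + 1 ≤ J) :
    (pvFullTo J)[(pvFullTo j).length + i]? = some (pvDirAt (j + 1)) := by
  obtain ⟨rest, hr⟩ := pvFullTo_prefix (j + 1) J hJ
  rw [hr]
  rw [List.getElem?_append_left (by rw [pvLength_fullTo_succ]; omega)]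
  show (pvFullTo j ++ List.replicate (pvSegLen (j + 1)) (pvDirAt (j + 1)))[(pvFullTo j).length + i]? = _
  rw [List.getElem?_append_right (by omega)]
  simp [hi]

lemma pvTake_one_buildCoords (c : Int × Int) (ms : List (Int × Int)) :
    (buildCoords c ms).take 1 = [c] := by
  cases ms <;> rfl

lemma pvSegsB_spec : ∀ (fuel j : Nat) (need : Int), need.toNat ≤ (pvFullTo j).length + fuel →
    ∃ J, j ≤ J ∧ pvSegsB fuel (pvFullTo j) ((j : Int) + 1) need = pvFullTo J ∧
      need.toNat ≤ (pvFullTo J).length := by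
  intro fuel
  induction fuel with
  | zero =>
    intro j need h
    exact ⟨j, le_refl j, rfl, by omega⟩
  | succ fuel ih =>
    intro j need h
    by_cases hlt : ((pvFullTo j).length : Int) < need
    · have h1 : (PySem.Int.floordiv ((j : Int) + 1 + 1) 2).toNat = pvSegLen (j + 1) := by
        have e : ((j : Int) + 1 + 1) = ((j + 2 : Nat) : Int) := by push_cast; ring
        have e2 : PySem.Int.floordiv ((j + 2 : Nat) : Int) 2 = (((j + 2) / 2 : Nat) : Int) := by
          exact_mod_cast PySem.Int.floordiv_natCast (j + 2) 2
        rw [e, e2]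
        simp only [Int.toNat_natCast, pvSegLen]
      have h2 : PySem.List.pyGetD snailDIRS (PySem.Int.mod ((j : Int) + 1 - 1) 4) (0, 0)
          = pvDirAt (j + 1) := by
        have e : ((j : Int) + 1 - 1) = ((j : Nat) : Int) := by push_cast; ring
        have e2 : PySem.Int.mod ((j : Nat) : Int) 4 = ((j % 4 : Nat) : Int) := by
          exact_mod_cast PySem.Int.mod_natCast j 4
        rw [e, e2, PySem.List.pyGetD_natCast]
        simp [pvDirAt]
      simp only [pvSegsB]
      rw [if_pos hlt, h1, h2]
      have harg : pvFullTo j ++ List.replicate (pvSegLen (j + 1)) (pvDirAt (j + 1))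
          = pvFullTo (j + 1) := rfl
      rw [harg]
      have hcast : ((j : Int) + 1 + 1) = (((j + 1 : Nat)) : Int) + 1 := by push_cast; ring
      rw [hcast]
      obtain ⟨J, hJ1, hJ2, hJ3⟩ := ih (j + 1) need (by
        have e1 := pvLength_fullTo_succ j
        have e2 := pvOne_le_segLen j
        omega)
      exact ⟨J, by omega, hJ2, hJ3⟩
    · simp only [pvSegsB]
      rw [if_neg hlt]
      exact ⟨j, le_refl j, rfl, by omega⟩

lemma pvInnerA_run (n target : Int) (c0 : Int × Int) (M : List (Int × Int)) (d : Int × Int)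
    (hM : M.length = (n ^ 2).toNat - 1) (hNsq : (n ^ 2 : Int) = ((n ^ 2).toNat : Int)) :
    ∀ (cnt t : Nat), t < (n ^ 2).toNat - 1 →
      (∀ i, i < cnt → t + i < (n ^ 2).toNat - 1 → M[t + i]? = some d) →
      pvInnerA n target cnt d ((t : Int) + 1) (pvPos c0 M t) (pvBoardAt n c0 M t) (pvCtgAt target c0 M t) c0
      = if t + cnt < (n ^ 2).toNat - 1 then
          .ok (((t + cnt : Nat) : Int) + 1, pvPos c0 M (t + cnt), pvBoardAt n c0 M (t + cnt),
            pvCtgAt target c0 M (t + cnt))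
        else .error (pvF n target c0 M) := by
  intro cnt
  induction cnt with
  | zero =>
    intro t ht hmv
    rw [if_pos (by omega : t + 0 < (n ^ 2).toNat - 1)]
    simp [pvInnerA]
  | succ cnt ih =>
    intro t ht hmv
    have hMt : t < M.length := by omega
    have hd : M[t] = d := by
      have h0 := hmv 0 (by omega) (by omega)
      rw [Nat.add_zero, List.getElem?_eq_getElem hMt] at h0
      exact Option.some.inj h0
    have hc : ((pvPos c0 M t).1 + d.1, (pvPos c0 M t).2 + d.2) = pvPos c0 M (t + 1) := by
      rw [pvPos_succ c0 M t hMt, hd]; rfl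
    have hnum : (t : Int) + 1 + 1 = (t : Int) + 2 := by ring
    have hb : pyWrite (pvBoardAt n c0 M t) ((pvPos c0 M t).1 + d.1) ((pvPos c0 M t).2 + d.2)
        ((t : Int) + 2) = pvBoardAt n c0 M (t + 1) := by
      rw [pvBoardAt_succ n c0 M t hMt, pvPos_succ c0 M t hMt, hd]
      simp [pvStep]
    have hctg : (if target = 1 then some c0
        else if (t : Int) + 2 = target then some (pvPos c0 M (t + 1))
        else pvCtgAt target c0 M t) = pvCtgAt target c0 M (t + 1) := (pvCtgAt_succ target c0 M t).symm
    simp only [pvInnerA, move_and_write]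
    rw [hnum, hb, hc, hctg]
    by_cases hend : (t : Int) + 2 = n ^ 2
    · rw [if_pos hend, if_neg (by omega : ¬(t + (cnt + 1) < (n ^ 2).toNat - 1))]
      have ht1 : t + 1 = (n ^ 2).toNat - 1 := by omega
      rw [ht1]
      rfl
    · rw [if_neg hend]
      have ht1 : t + 1 < (n ^ 2).toNat - 1 := by omega
      have hrec := ih (t + 1) ht1 (fun i hi hlt => by
        have h := hmv (i + 1) (by omega) (by omega)
        rwa [show t + (i + 1) = t + 1 + i from by omega] at h)
      rw [show (t : Int) + 2 = ((t + 1 : Nat) : Int) + 1 from by push_cast; ring, hrec,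
        show t + 1 + cnt = t + (cnt + 1) from by omega]

lemma pvDirsA_run (n target : Int) (c0 : Int × Int) (M : List (Int × Int))
    (hM : M.length = (n ^ 2).toNat - 1) (hNsq : (n ^ 2 : Int) = ((n ^ 2).toNat : Int))
    (hMseg : ∀ (j' i : Nat), i < pvSegLen (j' + 1) → (pvFullTo j').length + i < (n ^ 2).toNat - 1 →
      M[(pvFullTo j').length + i]? = some (pvDirAt (j' + 1)))
    (j : Nat) (hj1 : 1 ≤ j) (hmod : (j - 1) % 4 = 0) (ht : (pvFullTo (j - 1)).length < (n ^ 2).toNat - 1) :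
    pvDirsA n target [(0, -1), (1, 0), (0, 1), (-1, 0)] (j : Int) (((pvFullTo (j - 1)).length : Int) + 1)
      (pvPos c0 M (pvFullTo (j - 1)).length) (pvBoardAt n c0 M (pvFullTo (j - 1)).length)
      (pvCtgAt target c0 M (pvFullTo (j - 1)).length) c0
    = if (pvFullTo (j + 3)).length < (n ^ 2).toNat - 1 then
        .ok ((j : Int) + 4, ((pvFullTo (j + 3)).length : Int) + 1, pvPos c0 M (pvFullTo (j + 3)).length,
          pvBoardAt n c0 M (pvFullTo (j + 3)).length, pvCtgAt target c0 M (pvFullTo (j + 3)).length)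
      else .error (pvF n target c0 M) := by
  obtain ⟨j', rfl⟩ : ∃ j', j = j' + 1 := ⟨j - 1, by omega⟩
  simp only [Nat.add_sub_cancel] at hmod ht ⊢
  simp only [show j' + 1 + 3 = j' + 4 from rfl]
  have hl1 : (pvFullTo (j' + 1)).length = (pvFullTo j').length + pvSegLen (j' + 1) :=
    pvLength_fullTo_succ j'
  have hl2 : (pvFullTo (j' + 2)).length = (pvFullTo (j' + 1)).length + pvSegLen (j' + 2) :=
    pvLength_fullTo_succ (j' + 1)
  have hl3 : (pvFullTo (j' + 3)).length = (pvFullTo (j' + 2)).length + pvSegLen (j' + 3) :=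
    pvLength_fullTo_succ (j' + 2)
  have hl4 : (pvFullTo (j' + 4)).length = (pvFullTo (j' + 3)).length + pvSegLen (j' + 4) :=
    pvLength_fullTo_succ (j' + 3)
  have hd1 : pvDirAt (j' + 1) = ((0 : Int), (-1 : Int)) := by
    unfold pvDirAt; rw [show (j' + 1 - 1) % 4 = 0 from by omega]; rfl
  have hd2 : pvDirAt (j' + 2) = ((1 : Int), (0 : Int)) := by
    unfold pvDirAt; rw [show (j' + 2 - 1) % 4 = 1 from by omega]; rfl
  have hd3 : pvDirAt (j' + 3) = ((0 : Int), (1 : Int)) := by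
    unfold pvDirAt; rw [show (j' + 3 - 1) % 4 = 2 from by omega]; rfl
  have hd4 : pvDirAt (j' + 4) = ((-1 : Int), (0 : Int)) := by
    unfold pvDirAt; rw [show (j' + 4 - 1) % 4 = 3 from by omega]; rfl
  have hcnt : ∀ m : Nat, (PySem.Int.floordiv ((m : Int) + 1) 2).toNat = pvSegLen m := by
    intro m
    have e : PySem.Int.floordiv ((m : Int) + 1) 2 = (((m + 1) / 2 : Nat) : Int) := by
      rw [show ((m : Int) + 1) = ((m + 1 : Nat) : Int) from by push_cast; ring]
      exact_mod_cast PySem.Int.floordiv_natCast (m + 1) 2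
    rw [e, Int.toNat_natCast]
    rfl
  have hseg : ∀ (k : Nat) (dd : Int × Int), pvDirAt (k + 1) = dd →
      ∀ i, i < pvSegLen (k + 1) → (pvFullTo k).length + i < (n ^ 2).toNat - 1 →
      M[(pvFullTo k).length + i]? = some dd := fun k dd hdd i hi hlt => by
    have h := hMseg k i hi hlt; rwa [hdd] at h
  simp only [pvDirsA]
  rw [show (((j' + 1 : Nat) : Int)) + 1 + 1 = (((j' + 2 : Nat) : Int)) + 1 from by push_cast; ring]
  rw [show (((j' + 2 : Nat) : Int)) + 1 + 1 = (((j' + 3 : Nat) : Int)) + 1 from by push_cast; ring]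
  rw [show (((j' + 3 : Nat) : Int)) + 1 + 1 = (((j' + 4 : Nat) : Int)) + 1 from by push_cast; ring]
  rw [hcnt (j' + 1), hcnt (j' + 2), hcnt (j' + 3), hcnt (j' + 4)]
  rw [pvInnerA_run n target c0 M _ hM hNsq (pvSegLen (j' + 1)) (pvFullTo j').length ht
    (hseg j' _ hd1)]
  by_cases hx1 : (pvFullTo j').length + pvSegLen (j' + 1) < (n ^ 2).toNat - 1
  · rw [if_pos hx1]
    dsimp only
    rw [← hl1]
    rw [pvInnerA_run n target c0 M _ hM hNsq (pvSegLen (j' + 2)) (pvFullTo (j' + 1)).length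
      (by omega) (hseg (j' + 1) _ hd2)]
    by_cases hx2 : (pvFullTo (j' + 1)).length + pvSegLen (j' + 2) < (n ^ 2).toNat - 1
    · rw [if_pos hx2]
      dsimp only
      rw [← hl2]
      rw [pvInnerA_run n target c0 M _ hM hNsq (pvSegLen (j' + 3)) (pvFullTo (j' + 2)).length
        (by omega) (hseg (j' + 2) _ hd3)]
      by_cases hx3 : (pvFullTo (j' + 2)).length + pvSegLen (j' + 3) < (n ^ 2).toNat - 1
      · rw [if_pos hx3]
        dsimp only
        rw [← hl3]
        rw [pvInnerA_run n target c0 M _ hM hNsq (pvSegLen (j' + 4)) (pvFullTo (j' + 3)).length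
          (by omega) (hseg (j' + 3) _ hd4)]
        by_cases hx4 : (pvFullTo (j' + 3)).length + pvSegLen (j' + 4) < (n ^ 2).toNat - 1
        · rw [if_pos hx4]
          dsimp only
          rw [← hl4]
          rw [if_pos (show (pvFullTo (j' + 4)).length < (n ^ 2).toNat - 1 from by omega)]
          rw [show ((j' + 4 : Nat) : Int) + 1 = ((j' + 1 : Nat) : Int) + 4 from by push_cast; ring]
        · rw [if_neg hx4]
          rw [if_neg (show ¬((pvFullTo (j' + 4)).length < (n ^ 2).toNat - 1) from by omega)]
      · rw [if_neg hx3]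
        rw [if_neg (show ¬((pvFullTo (j' + 4)).length < (n ^ 2).toNat - 1) from by
          have hm := pvFullTo_mono (j' + 3) (j' + 4) (by omega)
          omega)]
    · rw [if_neg hx2]
      rw [if_neg (show ¬((pvFullTo (j' + 4)).length < (n ^ 2).toNat - 1) from by
        have hm := pvFullTo_mono (j' + 2) (j' + 4) (by omega)
        omega)]
  · rw [if_neg hx1]
    rw [if_neg (show ¬((pvFullTo (j' + 4)).length < (n ^ 2).toNat - 1) from by
      have hm := pvFullTo_mono (j' + 1) (j' + 4) (by omega)
      omega)]

lemma pvWhileA_run (n target : Int) (c0 : Int × Int) (M : List (Int × Int))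
    (hM : M.length = (n ^ 2).toNat - 1) (hNsq : (n ^ 2 : Int) = ((n ^ 2).toNat : Int))
    (hMseg : ∀ (j' i : Nat), i < pvSegLen (j' + 1) → (pvFullTo j').length + i < (n ^ 2).toNat - 1 →
      M[(pvFullTo j').length + i]? = some (pvDirAt (j' + 1))) :
    ∀ (fuel j : Nat), 1 ≤ j → (j - 1) % 4 = 0 → (pvFullTo (j - 1)).length < (n ^ 2).toNat - 1 →
      (n ^ 2).toNat - 1 - (pvFullTo (j - 1)).length ≤ 4 * fuel →
      pvWhileA fuel n target (j : Int) (((pvFullTo (j - 1)).length : Int) + 1)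
        (pvPos c0 M (pvFullTo (j - 1)).length) (pvBoardAt n c0 M (pvFullTo (j - 1)).length)
        (pvCtgAt target c0 M (pvFullTo (j - 1)).length) c0
      = pvF n target c0 M := by
  intro fuel
  induction fuel with
  | zero =>
    intro j hj hmod ht hfl
    exfalso; omega
  | succ fuel ih =>
    intro j hj hmod ht hfl
    simp only [pvWhileA]
    rw [pvDirsA_run n target c0 M hM hNsq hMseg j hj hmod ht]
    by_cases hc : (pvFullTo (j + 3)).length < (n ^ 2).toNat - 1
    · rw [if_pos hc]
      dsimp only
      have hlen4 : (pvFullTo (j - 1)).length + 4 ≤ (pvFullTo (j + 3)).length := by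
        obtain ⟨j', rfl⟩ : ∃ j', j = j' + 1 := ⟨j - 1, by omega⟩
        have a1 : (pvFullTo (j' + 1)).length = (pvFullTo j').length + pvSegLen (j' + 1) :=
          pvLength_fullTo_succ j'
        have a2 : (pvFullTo (j' + 2)).length = (pvFullTo (j' + 1)).length + pvSegLen (j' + 2) :=
          pvLength_fullTo_succ (j' + 1)
        have a3 : (pvFullTo (j' + 3)).length = (pvFullTo (j' + 2)).length + pvSegLen (j' + 3) :=
          pvLength_fullTo_succ (j' + 2)
        have a4 : (pvFullTo (j' + 4)).length = (pvFullTo (j' + 3)).length + pvSegLen (j' + 4) :=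
          pvLength_fullTo_succ (j' + 3)
        have b1 : 1 ≤ pvSegLen (j' + 1) := pvOne_le_segLen j'
        have b2 : 1 ≤ pvSegLen (j' + 2) := pvOne_le_segLen (j' + 1)
        have b3 : 1 ≤ pvSegLen (j' + 3) := pvOne_le_segLen (j' + 2)
        have b4 : 1 ≤ pvSegLen (j' + 4) := pvOne_le_segLen (j' + 3)
        simp only [Nat.add_sub_cancel, show j' + 1 + 3 = j' + 4 from rfl]
        omega
      have hj3 : j + 4 - 1 = j + 3 := by omega
      have H := ih (j + 4) (by omega) (by omega)
        (by simp only [hj3]; exact hc)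
        (by simp only [hj3]; omega)
      simp only [hj3] at H
      rw [show ((j : Nat) : Int) + 4 = ((j + 4 : Nat) : Int) from by push_cast; ring]
      exact H
    · rw [if_neg hc]

-- ===== VERDICT (by name: the statement is the Claim_ definition above) =====
theorem make_snail_board_spec : Claim_equal_make_snail_board := by
  intro n target _ hpre
  unfold Spec_make_snail_board
  unfold Pre_make_snail_board at hpre
  rcases hpre with h1 | ⟨hn3, _hodd, ht1, ht2⟩
  · subst h1; rfl
  · have hn1 : n ≠ 1 := by omega
    have hxx : (n * n : Int) = n ^ 2 := by ring
    have hsq9 : (9 : Int) ≤ n ^ 2 := by nlinarith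
    have hNsq : (n ^ 2 : Int) = (((n ^ 2).toNat : Nat) : Int) := by
      rw [Int.toNat_of_nonneg (by positivity)]
    have hN9 : 9 ≤ (n ^ 2).toNat := by omega
    obtain ⟨J, _hJ0, hJeq, hJlen⟩ :=
      pvSegsB_spec (n * n - 1).toNat 0 (n * n - 1) (by simp [pvFullTo])
    have hnn : (n * n - 1 : Int) = (((n ^ 2).toNat - 1 : Nat) : Int) := by
      have hx : (n * n : Int) = n ^ 2 := by ring
      omega
    set M : List (Int × Int) := (pvFullTo J).take ((n ^ 2).toNat - 1) with hMdef
    have hJlen' : (n ^ 2).toNat - 1 ≤ (pvFullTo J).length := by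
      have hx : (n * n : Int) = n ^ 2 := by ring
      omega
    have hM : M.length = (n ^ 2).toNat - 1 := by
      rw [hMdef, List.length_take]; omega
    have hMseg : ∀ (j' i : Nat), i < pvSegLen (j' + 1) →
        (pvFullTo j').length + i < (n ^ 2).toNat - 1 →
        M[(pvFullTo j').length + i]? = some (pvDirAt (j' + 1)) := by
      intro j' i hi hlt
      have hjJ : j' + 1 ≤ J := by
        by_contra hcon
        have := pvFullTo_mono J j' (by omega)
        omega
      rw [hMdef, List.getElem?_take_of_lt hlt]
      exact pvFullTo_getElem? j' i J hi hjJ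
    -- A equals the canonical value
    have e0 : pvBoardAt n (PySem.Int.floordiv n 2, PySem.Int.floordiv n 2) M 0
        = pyWrite (some (List.replicate n.toNat (List.replicate n.toNat 0)))
          (PySem.Int.floordiv n 2) (PySem.Int.floordiv n 2) 1 := by
      unfold pvBoardAt pvZeros
      rw [show (0 + 1) = 1 from rfl, pvTake_one_buildCoords]
      rfl
    have ectg0 : (none : Option (Int × Int))
        = pvCtgAt target (PySem.Int.floordiv n 2, PySem.Int.floordiv n 2) M 0 := by
      unfold pvCtgAt
      rw [if_neg (show ¬(target = 1 ∧ 1 ≤ (0 : Nat)) from by omega),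
          if_neg (show ¬(2 ≤ target ∧ target ≤ (((0 : Nat)) : Int) + 1) from by push_cast; omega)]
    have erun := pvWhileA_run n target (PySem.Int.floordiv n 2, PySem.Int.floordiv n 2) M hM hNsq
      hMseg (n ^ 2).toNat 1 (by omega) (by omega)
      (by simp only [pvFullTo, List.length_nil]; omega)
      (by simp only [pvFullTo, List.length_nil]; omega)
    simp only [pvFullTo, List.length_nil, Nat.cast_zero, Nat.cast_one, zero_add] at erun
    rw [e0] at erun
    rw [← ectg0] at erun
    have epos0 : pvPos (PySem.Int.floordiv n 2, PySem.Int.floordiv n 2) M 0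
        = ((PySem.Int.floordiv n 2, PySem.Int.floordiv n 2) : Int × Int) := rfl
    rw [epos0] at erun
    have hA : make_snail_board n target
        = (match pvF n target (PySem.Int.floordiv n 2, PySem.Int.floordiv n 2) M with
           | some r => r | none => ([], [])) := by
      simp only [make_snail_board]
      rw [if_neg hn1, erun]
    -- B equals the canonical value
    have hJeq' : pvSegsB (n * n - 1).toNat [] 1 (n * n - 1) = pvFullTo J := by
      have h := hJeq
      simpa [pvFullTo] using h
    have hfillF : pvWriteRun (some (List.replicate n.toNat (List.replicate n.toNat 0)))
        (buildCoords (PySem.Int.floordiv n 2, PySem.Int.floordiv n 2) M) 1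
        = pvBoardAt n (PySem.Int.floordiv n 2, PySem.Int.floordiv n 2) M ((n ^ 2).toNat - 1) := by
      unfold pvBoardAt pvZeros
      rw [show (n ^ 2).toNat - 1 + 1 = (n ^ 2).toNat from by omega]
      rw [List.take_of_length_le (by
        rw [pvLength_buildCoords, hM]; omega)]
    have hget : PySem.List.pyGet?
        (buildCoords (PySem.Int.floordiv n 2, PySem.Int.floordiv n 2) M) (target - 1)
        = some (pvPos (PySem.Int.floordiv n 2, PySem.Int.floordiv n 2) M (target - 1).toNat) := by
      rw [show (target - 1) = (((target - 1).toNat : Nat) : Int) from by omega,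
        PySem.List.pyGet?_natCast]
      exact pvGetElem?_buildCoords M _ (target - 1).toNat (by rw [hM]; omega)
    have hctgF : pvCtgAt target (PySem.Int.floordiv n 2, PySem.Int.floordiv n 2) M
        ((n ^ 2).toNat - 1)
        = some (pvPos (PySem.Int.floordiv n 2, PySem.Int.floordiv n 2) M (target - 1).toNat) := by
      unfold pvCtgAt
      by_cases h1 : target = 1
      · rw [if_pos ⟨h1, by omega⟩]
        subst h1
        simp [pvPos]
      · rw [if_neg (fun h => h1 h.1),
          if_pos (show 2 ≤ target ∧ target ≤ ((((n ^ 2).toNat - 1 : Nat)) : Int) + 1 from by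
            push_cast; omega)]
    have hB : make_snail_board_alt n target
        = (match pvF n target (PySem.Int.floordiv n 2, PySem.Int.floordiv n 2) M with
           | some r => r | none => ([], [])) := by
      simp only [make_snail_board_alt]
      rw [if_neg hn1, hJeq']
      rw [show PySem.List.slice (pvFullTo J) none (some (n * n - 1))
            = (pvFullTo J).take ((n ^ 2).toNat - 1) from by
          rw [hnn, PySem.List.slice_to_natCast]]
      rw [← hMdef]
      rw [pvFillB_enumerate, zero_add, hfillF, hget]
      unfold pvF
      rw [hctgF]
      cases pvBoardAt n (PySem.Int.floordiv n 2, PySem.Int.floordiv n 2) M ((n ^ 2).toNat - 1) <;>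
        rfl
    rw [hA, hB]
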